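-- pv_equiv track=rewrite | github.com/weiyinfu/shortcuts | parser.py | command2string
-- ===== SOURCE A (Python) =====
-- def command2string(command):
--     # 把命令转成string
--     s = ''
--     last_is_big = True
--     for i in command:
--         if i == '.':
--             s += '>'
--             last_is_big = False
--         elif 'A' <= i <= 'Z':
--             if not last_is_big:
--                 s += ' '
--             s += i
--             last_is_big = True
--         else:
--             s += i
--             last_is_big = False
--     return s
-- ===== SOURCE B (Python) =====
-- def command2string(command):
--     t = ''.join('>' if c == '.' else c for c in command)
--     out = []
--     i, n = 0, len(t)
--     while i < n:
--         up = t[i].isupper()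
--         j = i
--         while j < n and t[j].isupper() == up:
--             j += 1
--         if up and i > 0:
--             out.append(' ')
--         out.append(t[i:j])
--         i = j
--     return ''.join(out)
-- ===== Notes on version B (the rewrite author's own statement) =====
-- stated objective: alternative
-- what changed: Replaces A's per-character state machine with a last_is_big flag by a maximal-run algorithm: after a '.'->'>' substitution pass, an index loop finds each maximal run of same-isupper-class characters and emits it as one slice, prefixing a space to every non-initial uppercase run.
import Mathlib
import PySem

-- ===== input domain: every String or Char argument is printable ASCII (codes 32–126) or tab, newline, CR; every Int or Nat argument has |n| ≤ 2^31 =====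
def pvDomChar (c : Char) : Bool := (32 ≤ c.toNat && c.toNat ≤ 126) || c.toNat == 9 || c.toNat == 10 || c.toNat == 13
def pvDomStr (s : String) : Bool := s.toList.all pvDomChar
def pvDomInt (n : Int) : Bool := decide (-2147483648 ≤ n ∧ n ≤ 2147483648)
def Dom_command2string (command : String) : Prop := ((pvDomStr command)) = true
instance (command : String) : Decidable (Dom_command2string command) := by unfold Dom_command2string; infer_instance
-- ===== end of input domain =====

-- B replaces A's per-character last_is_big state machine by a maximal-run algorithm
-- ('.'->'>' substitution, then emit maximal same-case runs as slices, a space before each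
-- non-initial uppercase run); alternative decomposition, same O(n) cost.


-- ===== PORT A =====
-- one loop iteration of A: state = (s, last_is_big)
def stepA (st : List Char × Bool) (i : Char) : List Char × Bool :=
  if i = '.' then (st.1 ++ ['>'], false)
  else if 'A' ≤ i ∧ i ≤ 'Z' then
    ((if !st.2 then st.1 ++ [' '] else st.1) ++ [i], true)
  else (st.1 ++ [i], false)

def command2string (command : String) : String :=
  String.ofList ((command.toList.foldl stepA ([], true)).1)

-- ===== PORT B =====
-- per-char ASCII uppercase test; exact for Python's str.isupper on single printable-ASCII chars
def pvUpper (c : Char) : Bool := decide ('A' ≤ c) && decide (c ≤ 'Z')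

-- '>' if c == '.' else c
def pvRepl (c : Char) : Char := if c = '.' then '>' else c

-- Source B's outer while loop: each step scans the maximal run of same-isupper-class characters
-- (the inner 'while j < n' scan = takeWhile; advancing i to j = dropWhile) and emits it as one
-- slice, prefixed by ' ' when the run is uppercase and not at the start (first = i == 0).
def goRuns : Bool → List Char → List Char
  | _, [] => []
  | first, c :: cs =>
    (if pvUpper c && !first
       then ' ' :: (c :: cs).takeWhile (fun x => pvUpper x == pvUpper c)
       else (c :: cs).takeWhile (fun x => pvUpper x == pvUpper c))
    ++ goRuns false ((c :: cs).dropWhile (fun x => pvUpper x == pvUpper c))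
termination_by _ l => l.length
decreasing_by
  simp only [List.dropWhile_cons, beq_self_eq_true, if_true, List.length_cons]
  exact Nat.lt_succ_of_le (List.length_dropWhile_le _ _)

def command2string_alt (command : String) : String :=
  String.ofList (goRuns true (command.toList.map pvRepl))

-- ===== PRECONDITION & SPEC =====
def Spec_command2string (command : String) (out : String) : Prop := out = command2string_alt command
instance (command : String) (out : String) : Decidable (Spec_command2string command out) := by unfold Spec_command2string; infer_instance

-- ===== CLAIM (what is proved, stated in full; the proofs are below) =====
def Claim_equal_command2string : Prop := ∀ (command : String), Dom_command2string command → Spec_command2string command (command2string command)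

-- ===== LEMMAS AND PROOFS =====

lemma pvUpper_true {c : Char} (h : 'A' ≤ c ∧ c ≤ 'Z') : pvUpper c = true := by
  simp [pvUpper]; exact h

lemma pvUpper_false {c : Char} (h : ¬ ('A' ≤ c ∧ c ≤ 'Z')) : pvUpper c = false := by
  simp [pvUpper]
  intro ha
  by_contra hb
  exact h ⟨ha, not_lt.mp hb⟩

-- the recursive characterisation of A's loop: output for the rest of the string,
-- given whether the previous char was uppercase (b)
def gA (b : Bool) : List Char → List Char
  | [] => []
  | c :: cs =>
    if c = '.' then '>' :: gA false cs
    else if 'A' ≤ c ∧ c ≤ 'Z' then (if !b then [' '] else []) ++ c :: gA true cs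
    else c :: gA false cs

lemma foldA_eq : ∀ (l : List Char) (s : List Char) (b : Bool),
    (l.foldl stepA (s, b)).1 = s ++ gA b l := by
  intro l
  induction l with
  | nil => intro s b; simp [gA]
  | cons c cs ih =>
    intro s b
    rw [List.foldl_cons]
    by_cases h1 : c = '.'
    · rw [show stepA (s, b) c = (s ++ ['>'], false) from by simp [stepA, h1], ih]
      simp [gA, h1]
    · by_cases h2 : 'A' ≤ c ∧ c ≤ 'Z'
      · cases b
        · rw [show stepA (s, false) c = (s ++ [' ', c], true) from by simp [stepA, h1, h2], ih]
          simp [gA, h1, h2]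
        · rw [show stepA (s, true) c = (s ++ [c], true) from by simp [stepA, h1, h2], ih]
          simp [gA, h1, h2]
      · rw [show stepA (s, b) c = (s ++ [c], false) from by simp [stepA, h1, h2], ih]
        simp [gA, h1, h2]

-- the same machine on the already-substituted list, branching only on pvUpper
def gP : Bool → List Char → List Char
  | _, [] => []
  | b, c :: cs =>
    if pvUpper c then (if !b then [' '] else []) ++ c :: gP true cs
    else c :: gP false cs

lemma gP_map : ∀ (l : List Char) (b : Bool), gP b (l.map pvRepl) = gA b l := by
  intro l
  induction l with
  | nil => intro b; simp [gP, gA]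
  | cons c cs ih =>
    intro b
    by_cases h1 : c = '.'
    · subst h1
      have h : pvUpper '>' = false := by decide
      simp [pvRepl, gP, gA, h, ih]
    · by_cases h2 : 'A' ≤ c ∧ c ≤ 'Z'
      · have hu : pvUpper c = true := pvUpper_true h2
        simp [pvRepl, h1, gP, gA, h2, hu, ih]
      · have hu : pvUpper c = false := pvUpper_false h2
        simp [pvRepl, h1, gP, gA, h2, hu, ih]

-- gP over a nonempty run whose characters all have upper-class 'up'
lemma gP_run : ∀ (run rest : List Char) (b up : Bool), run ≠ [] →
    (∀ x ∈ run, pvUpper x = up) →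
    gP b (run ++ rest) = (if up && !b then [' '] else []) ++ run ++ gP up rest := by
  intro run
  induction run with
  | nil => intro rest b up h; exact absurd rfl h
  | cons c run' ih =>
    intro rest b up _ hall
    have hc : pvUpper c = up := hall c (List.mem_cons_self ..)
    have hstep : ∀ X, gP b (c :: X)
        = (if pvUpper c && !b then [' '] else []) ++ c :: gP (pvUpper c) X := by
      intro X
      cases hcc : pvUpper c
      · simp [gP, hcc]
      · cases b <;> simp [gP, hcc]
    cases run' with
    | nil =>
      rw [List.singleton_append, hstep, hc]
      simp
    | cons d run'' =>
      have hrec := ih rest up up (by simp) (fun x hx => hall x (List.mem_cons_of_mem _ hx))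
      rw [List.cons_append, hstep, hc, hrec]
      cases up <;> simp

-- gP is insensitive to the flag when the next char is not uppercase
lemma gP_flag_indep : ∀ (rest : List Char) (b₁ b₂ : Bool),
    (∀ d ds, rest = d :: ds → pvUpper d = false) → gP b₁ rest = gP b₂ rest := by
  intro rest b₁ b₂ h
  cases rest with
  | nil => rfl
  | cons d ds =>
    have hd : pvUpper d = false := h d ds rfl
    simp [gP, hd]

lemma goRuns_eq_gP_len : ∀ (n : Nat) (t : List Char), t.length = n →
    ∀ first, goRuns first t = gP first t := by
  intro n
  induction n using Nat.strong_induction_on with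
  | _ n ih =>
    intro t ht first
    cases t with
    | nil => simp [goRuns, gP]
    | cons c cs =>
      set p : Char → Bool := fun x => pvUpper x == pvUpper c with hp
      have hsplit : (c :: cs).takeWhile p ++ (c :: cs).dropWhile p = c :: cs :=
        List.takeWhile_append_dropWhile
      have hrunne : (c :: cs).takeWhile p ≠ [] := by
        simp [hp]
      have hrunall : ∀ x ∈ (c :: cs).takeWhile p, pvUpper x = pvUpper c := by
        intro x hx
        have := List.mem_takeWhile_imp hx
        simpa [hp] using this
      have hresthead : ∀ d ds, (c :: cs).dropWhile p = d :: ds → pvUpper d ≠ pvUpper c := by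
        intro d ds hd
        have := List.head?_dropWhile_not p (c :: cs)
        rw [hd] at this
        simpa [hp] using this
      have hlen : ((c :: cs).dropWhile p).length < n := by
        rw [← ht]
        simp only [List.dropWhile_cons, hp, beq_self_eq_true, if_true, List.length_cons]
        exact Nat.lt_succ_of_le (List.length_dropWhile_le _ _)
      have ihrest : goRuns false ((c :: cs).dropWhile p) = gP false ((c :: cs).dropWhile p) :=
        ih _ hlen _ rfl false
      have hgp : gP first (c :: cs)
          = (if pvUpper c && !first then [' '] else []) ++ (c :: cs).takeWhile p
              ++ gP (pvUpper c) ((c :: cs).dropWhile p) := by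
        conv_lhs => rw [← hsplit]
        exact gP_run _ _ _ _ hrunne hrunall
      have hflag : gP (pvUpper c) ((c :: cs).dropWhile p) = gP false ((c :: cs).dropWhile p) := by
        cases hc : pvUpper c
        · rfl
        · refine gP_flag_indep _ _ _ ?_
          intro d ds hd
          have := hresthead d ds hd
          rw [hc] at this
          simpa using this
      rw [goRuns, hgp, hflag, ← ihrest]
      cases hcf : pvUpper c && !first <;> simp_all

lemma goRuns_eq_gP (t : List Char) (first : Bool) : goRuns first t = gP first t :=
  goRuns_eq_gP_len t.length t rfl first

-- ===== VERDICT (by name: the statement is the Claim_ definition above) =====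
theorem command2string_spec : Claim_equal_command2string := by
  intro command _
  show String.ofList ((command.toList.foldl stepA ([], true)).1) = _
  rw [foldA_eq, List.nil_append]
  unfold command2string_alt
  rw [goRuns_eq_gP, gP_map]
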